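-- pv_equiv track=rewrite | github.com/sgwoods/public | tools/render_publications.py | read_quoted
-- ===== SOURCE A (Python) =====
-- def read_quoted(text: str, index: int) -> tuple[str, int]:
--     start = index
--     index += 1
--     escaped = False
--     while index < len(text):
--         char = text[index]
--         if char == '"' and not escaped:
--             return text[start + 1:index], index + 1
--         escaped = char == "\\" and not escaped
--         if char != "\\":
--             escaped = False
--         index += 1
--     raise ValueError("Unterminated quoted BibTeX string.")
-- ===== SOURCE B (Python) =====
-- import re
--
-- # Maximal run of "escaped pair or any char that is not a quote/backslash" (DOTALL: \. may escape a newline).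
-- _QUOTED_CONTENT = re.compile(r'(?:\\.|[^"\\])*', re.DOTALL)
--
--
-- def read_quoted(text: str, index: int) -> tuple[str, int]:
--     m = _QUOTED_CONTENT.match(text, index + 1)
--     end = m.end()
--     if end < len(text) and text[end] == '"':
--         return text[index + 1:end], end + 1
--     raise ValueError("Unterminated quoted BibTeX string.")
-- ===== Notes on version B (the rewrite author's own statement) =====
-- stated objective: idiomatic
-- what changed: Replaces A's per-character while-loop with an explicit boolean escape flag by a single compiled-regex pass: re.match of r'(?:\\.|[^"\\])*' (DOTALL) at index+1 consumes escaped pairs and ordinary characters at once, and its match end locates the closing quote.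
-- outside the precondition, e.g. on read_quoted('a"c', -3): A returns ('', -1), B returns ('', 2)
import Mathlib
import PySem

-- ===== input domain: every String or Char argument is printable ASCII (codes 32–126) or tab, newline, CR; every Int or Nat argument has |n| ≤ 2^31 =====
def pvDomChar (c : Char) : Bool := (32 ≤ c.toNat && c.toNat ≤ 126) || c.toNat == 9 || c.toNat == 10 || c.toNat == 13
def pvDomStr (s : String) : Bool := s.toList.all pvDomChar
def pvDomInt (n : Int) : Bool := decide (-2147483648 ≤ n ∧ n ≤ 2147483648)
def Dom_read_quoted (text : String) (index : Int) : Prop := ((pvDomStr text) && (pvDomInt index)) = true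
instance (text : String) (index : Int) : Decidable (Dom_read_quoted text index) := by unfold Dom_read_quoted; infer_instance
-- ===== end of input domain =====

-- B replaces A's per-character boolean escape state machine by one regex pass
-- (re.match of r'(?:\\.|[^"\\])*' with DOTALL at index+1) whose match end locates the closing quote.

-- ===== PORT A =====
-- the while-loop of A; ("", 0) stands for the two raise paths (IndexError / ValueError), excluded by Pre_
def pvLoopA (text : String) (start : Int) (index : Int) (escaped : Bool) : String × Int :=
  if _h : index < (text.toList.length : Int) then
    match PySem.List.pyGet? text.toList index with
    | none => ("", 0)  -- Python IndexError on text[index] (negative index below -len); outside Pre_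
    | some char =>
      if char == '"' && !escaped then
        (PySem.Str.slice text (some (start + 1)) (some index), index + 1)
      else
        let escaped₁ := char == '\\' && !escaped
        let escaped₂ := if char != '\\' then false else escaped₁
        pvLoopA text start (index + 1) escaped₂
  else ("", 0)  -- Python: raise ValueError("Unterminated quoted BibTeX string."); outside Pre_
termination_by ((text.toList.length : Int) - index).toNat
decreasing_by omega

def read_quoted (text : String) (index : Int) : String × Int :=
  pvLoopA text index (index + 1) false

-- ===== PORT B =====
-- end position of re.match(r'(?:\\.|[^"\\])*', DOTALL) at position p: consume an escaped pair
-- (backslash plus any following char) or any single char that is neither '"' nor '\'; maximal munch.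
def pvMatchEnd (cs : List Char) (p : Nat) : Nat :=
  if _h : p < cs.length then
    let c := cs[p]
    if c = '"' then p
    else if c = '\\' then (if p + 1 < cs.length then pvMatchEnd cs (p + 2) else p)
    else pvMatchEnd cs (p + 1)
  else p
termination_by cs.length - p

def read_quoted_alt (text : String) (index : Int) : String × Int :=
  let cs := text.toList
  -- re.match clamps its pos argument into [0, len(text)]
  let pos : Nat := (min (max (index + 1) 0) (cs.length : Int)).toNat
  let e := pvMatchEnd cs pos
  if e < cs.length ∧ cs[e]? = some '"' then
    (PySem.Str.slice text (some (index + 1)) (some (e : Int)), (e : Int) + 1)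
  else ("", 0)  -- Python: raise ValueError("Unterminated quoted BibTeX string."); outside Pre_

-- ===== PRECONDITION & SPEC =====
-- length of the backslash run immediately before position j, not reaching below position lo
def pvBsRun (cs : List Char) (lo : Nat) : Nat → Nat
  | 0 => 0
  | j + 1 => if lo ≤ j ∧ cs[j]? = some '\\' then pvBsRun cs lo j + 1 else 0

-- Pre_ excludes (a) start indexes below -1, outside the function's natural domain, where A scans via
-- Python's negative-index wraparound (or raises IndexError) while the regex rewrite clamps pos to 0, and
-- (b) inputs with no unescaped closing quote after index, where A raises ValueError.
def Pre_read_quoted (text : String) (index : Int) : Prop :=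
  -1 ≤ index ∧ ∃ j < text.toList.length, index < (j : Int) ∧
    text.toList[j]? = some '"' ∧ pvBsRun text.toList (index + 1).toNat j % 2 = 0

instance (text : String) (index : Int) : Decidable (Pre_read_quoted text index) := by
  unfold Pre_read_quoted; infer_instance

def pvWitness_read_quoted : String × Int := ("\"a\\\"b\"", 0)

def Spec_read_quoted (text : String) (index : Int) (out : String × Int) : Prop := out = read_quoted_alt text index
instance (text : String) (index : Int) (out : String × Int) : Decidable (Spec_read_quoted text index out) := by unfold Spec_read_quoted; infer_instance

-- ===== CLAIM (what is proved, stated in full; the proofs are below) =====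
def Claim_equal_read_quoted : Prop := ∀ (text : String) (index : Int), Dom_read_quoted text index → Pre_read_quoted text index → Spec_read_quoted text index (read_quoted text index)

-- ===== LEMMAS AND PROOFS =====

-- proof-only view of B's result: what read_quoted_alt computes once re.match's pos argument is the Nat p
def pvBform (text : String) (start : Int) (p : Nat) : String × Int :=
  if pvMatchEnd text.toList p < text.toList.length ∧ text.toList[pvMatchEnd text.toList p]? = some '"' then
    (PySem.Str.slice text (some (start + 1)) (some (pvMatchEnd text.toList p : Int)),
     (pvMatchEnd text.toList p : Int) + 1)
  else ("", 0)

-- after A consumes a backslash (escaped = true), the next loop step never returns and always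
-- resets escaped to false: the escaped step of the state machine is "skip one character"
lemma pvLoopA_escaped (text : String) (start j : Int) (hj : 0 ≤ j) :
    pvLoopA text start j true = pvLoopA text start (j + 1) false := by
  by_cases h : j < (text.toList.length : Int)
  · rw [pvLoopA.eq_def, dif_pos h, PySem.List.pyGet?_eq_some_getElem _ hj h]
    by_cases hb : text.toList[j.toNat] = '\\'
    · simp [hb]
    · by_cases hq : text.toList[j.toNat] = '"' <;> simp [hb, hq]
  · rw [pvLoopA.eq_def, dif_neg h, pvLoopA.eq_def,
      dif_neg (by omega : ¬ j + 1 < (text.toList.length : Int))]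

-- the state machine of A (with escaped = false) computes exactly B's regex formulation
lemma pvLoopA_eq_pvBform (text : String) (start : Int) :
    ∀ n (i : Int), 0 ≤ i → ((text.toList.length : Int) - i).toNat ≤ n →
    pvLoopA text start i false = pvBform text start (min i.toNat text.toList.length) := by
  intro n
  induction n with
  | zero =>
    intro i hi hn
    have hm : min i.toNat text.toList.length = text.toList.length := by omega
    rw [pvLoopA.eq_def, dif_neg (by omega : ¬ i < (text.toList.length : Int)), pvBform, hm,
      pvMatchEnd.eq_def, dif_neg (lt_irrefl _)]
    simp
  | succ n ih =>
    intro i hi hn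
    by_cases h : i < (text.toList.length : Int)
    · have hil : i.toNat < text.toList.length := by omega
      have hm : min i.toNat text.toList.length = i.toNat := by omega
      rw [pvLoopA.eq_def, dif_pos h, PySem.List.pyGet?_eq_some_getElem _ hi h, pvBform, hm]
      by_cases hq : text.toList[i.toNat] = '"'
      · -- both sides return the closing-quote result at position i
        have he : pvMatchEnd text.toList i.toNat = i.toNat := by
          rw [pvMatchEnd.eq_def, dif_pos hil]; simp [hq]
        have hil' : i.toNat < text.length := by simpa using hil
        simp [hq, he, hil', Int.toNat_of_nonneg hi]
      · by_cases hb : text.toList[i.toNat] = '\\'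
        · -- A consumes the backslash and then one escaped character; the regex consumes the pair
          have hbe : (text.toList[i.toNat] == '"' && !false) = false := by simp [hq]
          have hbb : (text.toList[i.toNat] != '\\') = false := by simp [hb]
          have hbt : (text.toList[i.toNat] == '\\' && !false) = true := by simp [hb]
          simp only [hbe, Bool.false_eq_true, if_false, hbb, hbt]
          rw [pvLoopA_escaped text start (i + 1) (by omega), show i + 1 + 1 = i + 2 by ring]
          by_cases h2 : i.toNat + 1 < text.toList.length
          · have hstep : pvMatchEnd text.toList i.toNat = pvMatchEnd text.toList (i.toNat + 2) := by
              rw [pvMatchEnd.eq_def, dif_pos hil]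
              simp [hb, show i.toNat + 1 < text.length by simpa using h2]
            have hm2 : min (i + 2).toNat text.toList.length = i.toNat + 2 := by omega
            rw [ih (i + 2) (by omega) (by omega), hm2, pvBform]
            simp only [← hstep]
          · -- trailing backslash at the last position: both sides are the raise value
            have he : pvMatchEnd text.toList i.toNat = i.toNat := by
              rw [pvMatchEnd.eq_def, dif_pos hil]
              simp [hb, show ¬ i.toNat + 1 < text.length by simpa using h2]
            rw [pvLoopA.eq_def, dif_neg (by omega : ¬ i + 2 < (text.toList.length : Int))]
            simp [he, List.getElem?_eq_getElem hil, hq]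
        · -- an ordinary character: both sides move one position to the right
          have hstep : pvMatchEnd text.toList i.toNat = pvMatchEnd text.toList (i.toNat + 1) := by
            rw [pvMatchEnd.eq_def, dif_pos hil]; simp [hq, hb]
          have hm1 : min (i + 1).toNat text.toList.length = i.toNat + 1 := by omega
          have hbe : (text.toList[i.toNat] == '"' && !false) = false := by simp [hq]
          have hbb : (text.toList[i.toNat] != '\\') = true := by simp [hb]
          simp only [hbe, Bool.false_eq_true, if_false, hbb, if_true]
          rw [ih (i + 1) (by omega) (by omega), hm1, pvBform]
          simp only [← hstep]
    · have hm : min i.toNat text.toList.length = text.toList.length := by omega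
      rw [pvLoopA.eq_def, dif_neg h, pvBform, hm, pvMatchEnd.eq_def, dif_neg (lt_irrefl _)]
      simp

-- ===== VERDICT (by name: the statement is the Claim_ definition above) =====
theorem read_quoted_spec : Claim_equal_read_quoted := by
  intro text index _hdom hpre
  obtain ⟨hi, -⟩ := hpre
  unfold Spec_read_quoted read_quoted
  rw [pvLoopA_eq_pvBform text index (((text.toList.length : Int) - (index + 1)).toNat)
      (index + 1) (by omega) (le_refl _)]
  have hp : (min (max (index + 1) 0) ((text.toList.length : Int))).toNat
      = min (index + 1).toNat text.toList.length := by omega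
  simp only [read_quoted_alt, pvBform, hp]
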